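-- pv_equiv track=rewrite | github.com/iimmuunnee/baekjoon-programmers | 프로그래머스/1/133499. 옹알이 （2）/옹알이 （2）.py | solution
-- ===== SOURCE A (Python) =====
-- def solution(babbling):
--     answer = 0
--     can = ["aya", "ye", "woo", "ma"]
--
--     for s in babbling:
--         before = None
--         buf = ""
--         ok = True
--
--         for c in s:
--             buf += c
--
--             if not any(w.startswith(buf) for w in can):
--                 ok = False
--                 break
--
--             if buf in can:
--                 if buf == before:
--                     ok = False
--                     break
--                 before = buf
--                 buf = ""
--         if buf == "" and ok:
--             answer += 1
--
--     return answer
-- ===== SOURCE B (Python) =====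
-- def solution(babbling):
--     words = ["aya", "ye", "woo", "ma"]
--
--     def tokenize(s):
--         i, tokens = 0, []
--         while i < len(s):
--             for w in words:
--                 if s.startswith(w, i):
--                     tokens.append(w)
--                     i += len(w)
--                     break
--             else:
--                 return None
--         return tokens
--
--     count = 0
--     for s in babbling:
--         tokens = tokenize(s)
--         if tokens is not None and all(a != b for a, b in zip(tokens, tokens[1:])):
--             count += 1
--     return count
-- ===== Notes on version B (the rewrite author's own statement) =====
-- stated objective: alternative
-- what changed: A grows a character buffer and checks prefix-membership of the growing buffer per character; B matches whole words greedily at each position to build a token list, then checks no two adjacent tokens are equal.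
import Mathlib
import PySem

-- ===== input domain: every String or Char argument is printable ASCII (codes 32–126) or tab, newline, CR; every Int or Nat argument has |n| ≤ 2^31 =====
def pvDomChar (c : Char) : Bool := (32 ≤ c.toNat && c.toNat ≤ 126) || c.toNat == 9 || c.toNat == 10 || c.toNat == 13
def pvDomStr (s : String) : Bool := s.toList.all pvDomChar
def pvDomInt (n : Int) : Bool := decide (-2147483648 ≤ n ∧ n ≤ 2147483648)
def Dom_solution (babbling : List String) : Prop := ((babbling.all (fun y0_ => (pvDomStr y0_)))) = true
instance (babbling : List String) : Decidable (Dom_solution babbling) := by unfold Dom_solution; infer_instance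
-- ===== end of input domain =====

-- B changes the decomposition (word-level greedy tokenization + adjacency check instead of A's
-- char-by-char buffer automaton); same cost, no speed claim.

-- ===== PORT A =====
-- the allowed syllables (strings as List Char, per the PySem convention)
def canList : List (List Char) := [['a','y','a'], ['y','e'], ['w','o','o'], ['m','a']]

-- A's inner 'for c in s' loop with its break: state (before, buf); returns A's 'buf == "" and ok'
def loopA : List Char → Option (List Char) → List Char → Bool
  | [], _, buf => buf.isEmpty
  | c :: rest, before, buf =>
    let buf' := buf ++ [c]
    if ¬ (canList.any fun w => PySem.Chars.startswith w buf') then false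
    else if canList.contains buf' then
      if before == some buf' then false
      else loopA rest (some buf') []
    else loopA rest before buf'

def solution (babbling : List String) : Int :=
  babbling.foldl (fun answer s => if loopA s.toList none [] then answer + 1 else answer) 0

-- ===== PORT B =====
-- greedy word-by-word tokenizer (B's while-loop); none = the loop's 'return None'
def tokenize (cs : List Char) : Option (List (List Char)) :=
  match cs with
  | [] => some []
  | c :: rest =>
    match hw : canList.find? (fun w => PySem.Chars.startswith (c :: rest) w) with
    | none => none
    | some w => (tokenize ((c :: rest).drop w.length)).map (w :: ·)
termination_by cs.length
decreasing_by
  have hmem := List.mem_of_find?_eq_some hw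
  have : 1 ≤ w.length := by fin_cases hmem <;> simp
  simp; omega

def solution_alt (babbling : List String) : Int :=
  babbling.foldl (fun count s =>
    match tokenize s.toList with
    | none => count
    | some ts => if (ts.zip ts.tail).all (fun p => p.1 ≠ p.2) then count + 1 else count) 0

-- ===== PRECONDITION & SPEC =====
def Spec_solution (babbling : List String) (out : Int) : Prop := out = solution_alt babbling
instance (babbling : List String) (out : Int) : Decidable (Spec_solution babbling out) := by unfold Spec_solution; infer_instance

-- ===== CLAIM (what is proved, stated in full; the proofs are below) =====
def Claim_equal_solution : Prop := ∀ (babbling : List String), Dom_solution babbling → Spec_solution babbling (solution babbling)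

-- ===== LEMMAS AND PROOFS =====

-- adjacency check threaded with the previous token
def chk (before : Option (List Char)) : List (List Char) → Bool
  | [] => true
  | t :: r => (before != some t) && chk (some t) r

-- startswith as a decidable prefix test, so simp can evaluate it on symbolic characters
theorem sw_decide (s p : List Char) : PySem.Chars.startswith s p = decide (p <+: s) := by
  rw [Bool.eq_iff_iff]
  simp [PySem.Chars.startswith_iff]

theorem chk_some_eq (r : List (List Char)) : ∀ (t : List Char),
    chk (some t) r = ((t :: r).zip r).all (fun p => p.1 ≠ p.2) := by
  induction r with
  | nil => intro t; simp [chk]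
  | cons y r' ih => intro t; by_cases hty : t = y <;> simp [chk, ih y, hty]

theorem chk_eq_zipAll : ∀ (ts : List (List Char)),
    chk none ts = (ts.zip ts.tail).all (fun p => p.1 ≠ p.2) := by
  intro ts
  cases ts with
  | nil => simp [chk]
  | cons t r => simp [chk, chk_some_eq r t]

theorem tokenize_cons (c : Char) (rest : List Char) :
    tokenize (c :: rest) = match canList.find? (fun w => PySem.Chars.startswith (c :: rest) w) with
      | none => none
      | some w => (tokenize ((c :: rest).drop w.length)).map (w :: ·) := by
  rw [tokenize]
  cases hf : List.find? (fun w => PySem.Chars.startswith (c :: rest) w) canList <;> simp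

theorem loopA_eq_aux : ∀ (n : Nat) (cs : List Char), cs.length ≤ n → ∀ (before : Option (List Char)),
    loopA cs before [] = (tokenize cs).elim false (chk before) := by
  intro n
  induction n with
  | zero =>
    intro cs h before
    have hnil : cs = [] := List.eq_nil_of_length_eq_zero (Nat.le_zero.mp h)
    subst hnil
    simp [loopA, tokenize, chk]
  | succ n ih =>
    intro cs hlen before
    match cs, hlen with
    | [], _ => simp [loopA, tokenize, chk]
    | c :: rest, hlen =>
      by_cases hca : c = 'a'
      · subst hca
        match rest, hlen with
        | [], _ => simp [loopA, tokenize, tokenize_cons, chk, sw_decide, canList, List.find?, List.cons_prefix_cons]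
        | c2 :: rest2, hlen =>
          by_cases hc2 : c2 = 'y'
          · subst hc2
            match rest2, hlen with
            | [], _ => simp [loopA, tokenize, tokenize_cons, chk, sw_decide, canList, List.find?, List.cons_prefix_cons]
            | c3 :: rest3, hlen =>
              by_cases hc3 : c3 = 'a'
              · subst hc3
                have hih := ih rest3 (by simp at hlen; omega)
                by_cases hb : before = some ['a','y','a']
                · subst hb
                  simp [loopA, tokenize, tokenize_cons, chk, sw_decide, canList, List.find?, List.cons_prefix_cons]
                  cases htok : tokenize rest3 <;> simp [htok, chk]
                · simp [loopA, tokenize, tokenize_cons, chk, sw_decide, canList, List.find?, List.cons_prefix_cons, hb, hih]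
                  cases htok : tokenize rest3 <;> simp [htok, chk, hb]
              · simp [loopA, tokenize, tokenize_cons, chk, sw_decide, canList, List.find?, List.cons_prefix_cons, hc3, Ne.symm hc3]
          · simp [loopA, tokenize, tokenize_cons, chk, sw_decide, canList, List.find?, List.cons_prefix_cons, hc2, Ne.symm hc2]
      · by_cases hcy : c = 'y'
        · subst hcy
          match rest, hlen with
          | [], _ => simp [loopA, tokenize, tokenize_cons, chk, sw_decide, canList, List.find?, List.cons_prefix_cons]
          | c2 :: rest2, hlen =>
            by_cases hc2 : c2 = 'e'
            · subst hc2
              have hih := ih rest2 (by simp at hlen; omega)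
              by_cases hb : before = some ['y','e']
              · subst hb
                simp [loopA, tokenize, tokenize_cons, chk, sw_decide, canList, List.find?, List.cons_prefix_cons]
                cases htok : tokenize rest2 <;> simp [htok, chk]
              · simp [loopA, tokenize, tokenize_cons, chk, sw_decide, canList, List.find?, List.cons_prefix_cons, hb, hih]
                cases htok : tokenize rest2 <;> simp [htok, chk, hb]
            · simp [loopA, tokenize, tokenize_cons, chk, sw_decide, canList, List.find?, List.cons_prefix_cons, hc2, Ne.symm hc2]
        · by_cases hcw : c = 'w'
          · subst hcw
            match rest, hlen with
            | [], _ => simp [loopA, tokenize, tokenize_cons, chk, sw_decide, canList, List.find?, List.cons_prefix_cons]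
            | c2 :: rest2, hlen =>
              by_cases hc2 : c2 = 'o'
              · subst hc2
                match rest2, hlen with
                | [], _ => simp [loopA, tokenize, tokenize_cons, chk, sw_decide, canList, List.find?, List.cons_prefix_cons]
                | c3 :: rest3, hlen =>
                  by_cases hc3 : c3 = 'o'
                  · subst hc3
                    have hih := ih rest3 (by simp at hlen; omega)
                    by_cases hb : before = some ['w','o','o']
                    · subst hb
                      simp [loopA, tokenize, tokenize_cons, chk, sw_decide, canList, List.find?, List.cons_prefix_cons]
                      cases htok : tokenize rest3 <;> simp [htok, chk]
                    · simp [loopA, tokenize, tokenize_cons, chk, sw_decide, canList, List.find?, List.cons_prefix_cons, hb, hih]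
                      cases htok : tokenize rest3 <;> simp [htok, chk, hb]
                  · simp [loopA, tokenize, tokenize_cons, chk, sw_decide, canList, List.find?, List.cons_prefix_cons, hc3, Ne.symm hc3]
              · simp [loopA, tokenize, tokenize_cons, chk, sw_decide, canList, List.find?, List.cons_prefix_cons, hc2, Ne.symm hc2]
          · by_cases hcm : c = 'm'
            · subst hcm
              match rest, hlen with
              | [], _ => simp [loopA, tokenize, tokenize_cons, chk, sw_decide, canList, List.find?, List.cons_prefix_cons]
              | c2 :: rest2, hlen =>
                by_cases hc2 : c2 = 'a'
                · subst hc2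
                  have hih := ih rest2 (by simp at hlen; omega)
                  by_cases hb : before = some ['m','a']
                  · subst hb
                    simp [loopA, tokenize, tokenize_cons, chk, sw_decide, canList, List.find?, List.cons_prefix_cons]
                    cases htok : tokenize rest2 <;> simp [htok, chk]
                  · simp [loopA, tokenize, tokenize_cons, chk, sw_decide, canList, List.find?, List.cons_prefix_cons, hb, hih]
                    cases htok : tokenize rest2 <;> simp [htok, chk, hb]
                · simp [loopA, tokenize, tokenize_cons, chk, sw_decide, canList, List.find?, List.cons_prefix_cons, hc2, Ne.symm hc2]
            · simp [loopA, tokenize_cons, sw_decide, canList, List.find?, List.cons_prefix_cons, hca, hcy, hcw, hcm, Ne.symm hca, Ne.symm hcy, Ne.symm hcw, Ne.symm hcm]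

theorem loopA_eq (cs : List Char) (before : Option (List Char)) :
    loopA cs before [] = (tokenize cs).elim false (chk before) :=
  loopA_eq_aux cs.length cs le_rfl before

-- ===== VERDICT (by name: the statement is the Claim_ definition above) =====
theorem solution_spec : Claim_equal_solution := by
  intro babbling _
  show solution babbling = solution_alt babbling
  unfold solution solution_alt
  have hstep : (fun (answer : Int) (s : String) => if loopA s.toList none [] then answer + 1 else answer)
      = (fun (count : Int) (s : String) => match tokenize s.toList with
          | none => count
          | some ts => if (ts.zip ts.tail).all (fun p => p.1 ≠ p.2) then count + 1 else count) := by
    funext a s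
    rw [loopA_eq]
    cases h : tokenize s.toList with
    | none => simp
    | some ts => simp only [Option.elim, chk_eq_zipAll]
  rw [hstep]
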